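-- pv_equiv track=rewrite | github.com/MorningYin/geoagent-benchmark | pipeline/modules/module_4_quality_gate.py | _determine_pass
-- ===== SOURCE A (Python) =====
-- from typing import Any, Dict, List, Optional
--
-- def _determine_pass(scores: Dict[str, int]) -> tuple[bool, str]:
--     """Determine pass/fail and review priority from scores."""
--     values = list(scores.values())
--
--     if any(v <= 1 for v in values):
--         return False, "high"
--
--     if any(v <= 2 for v in values):
--         return True, "high"
--
--     if all(v >= 4 for v in values):
--         return True, "low"
--
--     return True, "medium"
-- ===== SOURCE B (Python) =====
-- RESULTS = [(False, "high"), (True, "high"), (True, "medium"), (True, "low")]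
--
-- def _determine_pass(scores):
--     """Table-driven: rank each value 0..3 arithmetically, reduce with min, look up."""
--     rank = 3
--     for v in scores.values():
--         rank = min(rank, (v >= 2) + (v >= 3) + (v >= 4))
--     return RESULTS[rank]
-- ===== Notes on version B (the rewrite author's own statement) =====
-- stated objective: alternative
-- what changed: Replaces A's branch ladder of three separate any/all scans with a table-driven design: each value is mapped arithmetically (a sum of boolean comparisons, no branches) to a rank 0..3, a single fold takes the minimum rank, and the result is one indexed lookup into a 4-entry table.
import Mathlib
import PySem

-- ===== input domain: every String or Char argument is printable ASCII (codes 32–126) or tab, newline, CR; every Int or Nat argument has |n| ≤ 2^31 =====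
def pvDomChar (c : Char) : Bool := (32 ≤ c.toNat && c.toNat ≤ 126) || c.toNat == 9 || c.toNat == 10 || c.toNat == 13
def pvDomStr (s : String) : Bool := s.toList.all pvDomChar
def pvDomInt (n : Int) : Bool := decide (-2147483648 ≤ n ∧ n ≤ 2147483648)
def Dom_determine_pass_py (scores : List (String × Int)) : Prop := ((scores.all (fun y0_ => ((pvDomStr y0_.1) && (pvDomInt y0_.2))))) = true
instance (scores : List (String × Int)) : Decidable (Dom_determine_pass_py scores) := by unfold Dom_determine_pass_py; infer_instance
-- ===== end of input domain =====

-- B is an alternative, table-driven design: each value is ranked 0..3 arithmetically,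
-- a single fold takes the minimum rank, and the answer is one lookup in a 4-entry table.

-- ===== PORT A =====
def determine_pass_py (scores : List (String × Int)) : Bool × String :=
  let values := (PySem.Dict.ofList scores).values
  if values.any (fun v => decide (v ≤ 1)) then (false, "high")
  else if values.any (fun v => decide (v ≤ 2)) then (true, "high")
  else if values.all (fun v => decide (v ≥ 4)) then (true, "low")
  else (true, "medium")

-- ===== PORT B =====
-- (v >= 2) + (v >= 3) + (v >= 4) from Source B: Python bool arithmetic, exact here
def pvRank (v : Int) : Nat :=
  (if v ≥ 2 then 1 else 0) + (if v ≥ 3 then 1 else 0) + (if v ≥ 4 then 1 else 0)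

def pvResults : List (Bool × String) :=
  [(false, "high"), (true, "high"), (true, "medium"), (true, "low")]

def determine_pass_py_alt (scores : List (String × Int)) : Bool × String :=
  let values := (PySem.Dict.ofList scores).values
  let rank := values.foldl (fun r v => min r (pvRank v)) 3
  -- RESULTS[rank]: rank is always 0..3, the default is unreachable
  pvResults.getD rank (true, "low")

-- ===== PRECONDITION & SPEC =====
def Spec_determine_pass_py (scores : List (String × Int)) (out : Bool × String) : Prop := out = determine_pass_py_alt scores
instance (scores : List (String × Int)) (out : Bool × String) : Decidable (Spec_determine_pass_py scores out) := by unfold Spec_determine_pass_py; infer_instance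

-- ===== CLAIM (what is proved, stated in full; the proofs are below) =====
def Claim_equal_determine_pass_py : Prop := ∀ (scores : List (String × Int)), Dom_determine_pass_py scores → Spec_determine_pass_py scores (determine_pass_py scores)

-- ===== LEMMAS AND PROOFS =====

theorem fmin_le_init (vs : List Int) (r : Nat) :
    vs.foldl (fun a v => min a (pvRank v)) r ≤ r := by
  induction vs generalizing r with
  | nil => simp
  | cons v t ih => exact le_trans (ih _) (min_le_left _ _)

theorem fmin_le_mem (vs : List Int) (v : Int) (hv : v ∈ vs) : ∀ (r : Nat),
    vs.foldl (fun a x => min a (pvRank x)) r ≤ pvRank v := by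
  induction vs with
  | nil => cases hv
  | cons w t ih =>
    intro r
    cases hv with
    | head => exact le_trans (fmin_le_init t _) (min_le_right _ _)
    | tail _ h => exact ih h _

theorem fmin_cases (vs : List Int) (r : Nat) :
    vs.foldl (fun a x => min a (pvRank x)) r = r ∨
      ∃ v ∈ vs, vs.foldl (fun a x => min a (pvRank x)) r = pvRank v := by
  induction vs generalizing r with
  | nil => exact Or.inl rfl
  | cons w t ih =>
    rcases ih (min r (pvRank w)) with h | ⟨v, hv, h⟩
    · rcases Nat.le_total r (pvRank w) with hle | hle
      · exact Or.inl (by simpa [Nat.min_eq_left hle] using h)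
      · exact Or.inr ⟨w, List.mem_cons_self, by simpa [Nat.min_eq_right hle] using h⟩
    · exact Or.inr ⟨v, List.mem_cons_of_mem _ hv, h⟩

theorem determine_core_eq (vs : List Int) :
    (if vs.any (fun v => decide (v ≤ 1)) then ((false, "high") : Bool × String)
     else if vs.any (fun v => decide (v ≤ 2)) then (true, "high")
     else if vs.all (fun v => decide (v ≥ 4)) then (true, "low")
     else (true, "medium"))
    = pvResults.getD (vs.foldl (fun r v => min r (pvRank v)) 3) (true, "low") := by
  set k := vs.foldl (fun r v => min r (pvRank v)) 3 with hk
  have hk3 : k ≤ 3 := fmin_le_init vs 3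
  have hmem : ∀ v ∈ vs, k ≤ pvRank v := fun v hv => fmin_le_mem vs v hv 3
  have hcase := fmin_cases vs 3
  rw [← hk] at hcase
  have hrank_ge : ∀ v : Int, (2 : Int) ≤ v → 1 ≤ pvRank v := by
    intro v h; unfold pvRank; split_ifs <;> omega
  have hrank0 : ∀ v : Int, pvRank v = 0 → v ≤ 1 := by
    intro v h; unfold pvRank at h; split_ifs at h <;> omega
  have hrank1 : ∀ v : Int, pvRank v ≤ 1 → v ≤ 2 := by
    intro v h; unfold pvRank at h; split_ifs at h <;> omega
  have hrank3 : ∀ v : Int, (4 : Int) ≤ v ↔ pvRank v = 3 := by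
    intro v; unfold pvRank; split_ifs <;> omega
  -- characterise A's three tests by k
  have h1 : (vs.any (fun v => decide (v ≤ 1)) = true) ↔ k = 0 := by
    simp only [List.any_eq_true, decide_eq_true_eq]
    constructor
    · rintro ⟨v, hv, hle⟩
      have : pvRank v = 0 := by unfold pvRank; split_ifs <;> omega
      have := hmem v hv; omega
    · intro h0
      rcases hcase with h | ⟨v, hv, hvk⟩
      · omega
      · exact ⟨v, hv, hrank0 v (by omega)⟩
  have h2 : (vs.any (fun v => decide (v ≤ 2)) = true) ↔ k ≤ 1 := by
    simp only [List.any_eq_true, decide_eq_true_eq]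
    constructor
    · rintro ⟨v, hv, hle⟩
      have : pvRank v ≤ 1 := by unfold pvRank; split_ifs <;> omega
      have := hmem v hv; omega
    · intro h0
      rcases hcase with h | ⟨v, hv, hvk⟩
      · omega
      · exact ⟨v, hv, hrank1 v (by omega)⟩
  have h3 : (vs.all (fun v => decide (v ≥ 4)) = true) ↔ k = 3 := by
    simp only [List.all_eq_true, decide_eq_true_eq]
    constructor
    · intro hall
      rcases hcase with h | ⟨v, hv, hvk⟩
      · exact h
      · have := (hrank3 v).1 (hall v hv); omega
    · intro h0 v hv
      have := hmem v hv
      have hle3 : pvRank v ≤ 3 := by unfold pvRank; split_ifs <;> omega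
      exact (hrank3 v).2 (by omega)
  interval_cases k
  · simp only [h1.2 rfl]; rfl
  · have b1 : vs.any (fun v => decide (v ≤ 1)) = false := by
      rw [Bool.eq_false_iff]; intro h; exact absurd (h1.1 h) (by omega)
    simp only [b1, h2.2 (by omega)]; rfl
  · have b1 : vs.any (fun v => decide (v ≤ 1)) = false := by
      rw [Bool.eq_false_iff]; intro h; exact absurd (h1.1 h) (by omega)
    have b2 : vs.any (fun v => decide (v ≤ 2)) = false := by
      rw [Bool.eq_false_iff]; intro h; exact absurd (h2.1 h) (by omega)
    have b3 : vs.all (fun v => decide (v ≥ 4)) = false := by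
      rw [Bool.eq_false_iff]; intro h; exact absurd (h3.1 h) (by omega)
    simp only [b1, b2, b3]; rfl
  · have b1 : vs.any (fun v => decide (v ≤ 1)) = false := by
      rw [Bool.eq_false_iff]; intro h; exact absurd (h1.1 h) (by omega)
    have b2 : vs.any (fun v => decide (v ≤ 2)) = false := by
      rw [Bool.eq_false_iff]; intro h; exact absurd (h2.1 h) (by omega)
    simp only [b1, b2, h3.2 rfl]; rfl

-- ===== VERDICT (by name: the statement is the Claim_ definition above) =====
theorem determine_pass_py_spec : Claim_equal_determine_pass_py := by
  intro scores _
  unfold Spec_determine_pass_py determine_pass_py determine_pass_py_alt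
  exact determine_core_eq _
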